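-- pv_equiv track=rewrite | github.com/mitsuhiko/ponyguruma | ponyguruma/_highlevel.py | escape
-- ===== SOURCE A (Python) =====
-- _special_escapes = {
--     '\r':   '\\r',
--     '\n':   '\\n',
--     '\t':   '\\t',
--     '\b':   '[\\b]',
--     '\v':   '\\v',
--     '\f':   '\\f',
--     '\0':   '\\0'
-- }
--
-- def escape(pattern):
--     """Escape all non-alphanumeric characters in pattern."""
--     s = list(pattern)
--     for i, c in enumerate(s):
--         if not ('a' <= c <= 'z' or 'A' <= c <= 'Z' or '0' <= c <= '9'):
--             if c in _special_escapes:
--                 s[i] = _special_escapes[c]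
--             else:
--                 s[i] = '\\' + c
--     return type(pattern)().join(s)
-- ===== SOURCE B (Python) =====
-- import re
--
-- _special_escapes = {
--     '\r':   '\\r',
--     '\n':   '\\n',
--     '\t':   '\\t',
--     '\b':   '[\\b]',
--     '\v':   '\\v',
--     '\f':   '\\f',
--     '\0':   '\\0'
-- }
--
-- def escape(pattern):
--     """Escape all non-alphanumeric characters in pattern."""
--     return re.sub(r'[^a-zA-Z0-9]',
--                   lambda m: _special_escapes.get(m.group(0), '\\' + m.group(0)),
--                   pattern)
-- ===== Notes on version B (the rewrite author's own statement) =====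
-- stated objective: faster
-- what changed: Replaces the explicit list-build / enumerate / index-mutate / join loop with a single re.sub over [^a-zA-Z0-9] whose replacement function consults the special-escapes dict and falls back to backslash-prefixing.
import Mathlib
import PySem

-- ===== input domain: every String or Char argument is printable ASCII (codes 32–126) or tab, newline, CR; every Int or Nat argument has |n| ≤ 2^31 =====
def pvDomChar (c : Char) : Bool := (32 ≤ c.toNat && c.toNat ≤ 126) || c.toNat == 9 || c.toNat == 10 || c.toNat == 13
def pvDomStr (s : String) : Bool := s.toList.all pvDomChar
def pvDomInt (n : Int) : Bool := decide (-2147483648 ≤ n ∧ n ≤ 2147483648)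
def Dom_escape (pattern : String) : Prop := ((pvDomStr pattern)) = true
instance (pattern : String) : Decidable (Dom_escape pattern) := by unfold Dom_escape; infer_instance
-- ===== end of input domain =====

-- B replaces A's list-build / enumerate / index-mutate / join loop by a single regex-style
-- per-character substitution pass (re.sub over [^a-zA-Z0-9] with a replacement function).

-- ===== PORT A =====
def specialEscapes : PySem.Dict Char String :=
  PySem.Dict.ofList [('\r', "\\r"), ('\n', "\\n"), ('\t', "\\t"),
                     ('\x08', "[\\b]"), ('\x0b', "\\v"), ('\x0c', "\\f"), ('\x00', "\\0")]

-- the body of A's 'for i, c in enumerate(s):' loop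
def escStep (s : List String) (ic : Int × Char) : List String :=
  if !(('a' ≤ ic.2 && ic.2 ≤ 'z') || ('A' ≤ ic.2 && ic.2 ≤ 'Z') || ('0' ≤ ic.2 && ic.2 ≤ '9')) then
    match specialEscapes.get? ic.2 with
    | some e => s.set ic.1.toNat e        -- s[i] = _special_escapes[c]
    | none => s.set ic.1.toNat (String.ofList ['\\', ic.2])   -- s[i] = '\\' + c
  else s

-- s = list(pattern); for i, c in enumerate(s): …; return ''.join(s)
def escape (pattern : String) : String :=
  PySem.Str.join ""
    ((PySem.List.enumerate pattern.toList 0).foldl escStep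
      (pattern.toList.map (fun c => String.ofList [c])))

-- ===== PORT B =====
-- the re.sub replacement function: _special_escapes.get(ch, '\\' + ch)
def replEsc (c : Char) : String := specialEscapes.getD c (String.ofList ['\\', c])

-- re.sub(r'[^a-zA-Z0-9]', repl, pattern): one scan, alphanumerics pass through,
-- every other character is replaced by the replacement function's result
def escape_alt (pattern : String) : String :=
  String.ofList (pattern.toList.flatMap (fun c =>
    if ('a' ≤ c && c ≤ 'z') || ('A' ≤ c && c ≤ 'Z') || ('0' ≤ c && c ≤ '9') then [c]
    else (replEsc c).toList))

-- ===== PRECONDITION & SPEC =====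
def Spec_escape (pattern : String) (out : String) : Prop := out = escape_alt pattern
instance (pattern : String) (out : String) : Decidable (Spec_escape pattern out) := by unfold Spec_escape; infer_instance

-- ===== CLAIM (what is proved, stated in full; the proofs are below) =====
def Claim_equal_escape : Prop := ∀ (pattern : String), Dom_escape pattern → Spec_escape pattern (escape pattern)

-- ===== LEMMAS AND PROOFS =====

/-- The per-character result A's loop stores at position i. -/
def escChar (c : Char) : String :=
  if ('a' ≤ c && c ≤ 'z') || ('A' ≤ c && c ≤ 'Z') || ('0' ≤ c && c ≤ '9') then String.ofList [c]
  else replEsc c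

lemma escStep_at_len (pre : List String) (c : Char) (t : List String) :
    escStep (pre ++ String.ofList [c] :: t) ((pre.length : Int), c) = pre ++ escChar c :: t := by
  unfold escStep
  by_cases h : (('a' ≤ c && c ≤ 'z') || ('A' ≤ c && c ≤ 'Z') || ('0' ≤ c && c ≤ '9')) = true
  · simp [h, escChar]
  · simp only [Bool.not_eq_true] at h
    have htoNat : ((pre.length : Int)).toNat = pre.length := Int.toNat_natCast _
    have hesc : escChar c = (specialEscapes.get? c).getD (String.ofList ['\\', c]) := by
      simp [escChar, h, replEsc, PySem.Dict.getD_eq_get?_getD]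
    cases hg : specialEscapes.get? c with
    | some e => simp [h, htoNat, hesc, hg]
    | none => simp [h, htoNat, hesc, hg]

lemma loop_eq (l : List Char) (pre : List String) :
    (PySem.List.enumerate l (pre.length : Int)).foldl escStep
      (pre ++ l.map (fun c => String.ofList [c])) = pre ++ l.map escChar := by
  induction l generalizing pre with
  | nil => simp [PySem.List.enumerate_nil]
  | cons c t ih =>
    rw [PySem.List.enumerate_cons, List.foldl_cons, List.map_cons,
        show pre ++ String.ofList [c] :: t.map (fun c => String.ofList [c])
           = pre ++ [String.ofList [c]] ++ t.map (fun c => String.ofList [c]) by simp]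
    have h1 : escStep (pre ++ [String.ofList [c]] ++ t.map (fun c => String.ofList [c]))
        ((pre.length : Int), c) = (pre ++ [escChar c]) ++ t.map (fun c => String.ofList [c]) := by
      simpa using escStep_at_len pre c (t.map (fun c => String.ofList [c]))
    rw [h1, show (pre.length : Int) + 1 = ((pre ++ [escChar c]).length : Int) by simp,
        ih (pre ++ [escChar c])]
    simp

lemma join_map_escChar (l : List Char) :
    PySem.Str.join "" (l.map escChar)
      = String.ofList (l.flatMap (fun c =>
          if ('a' ≤ c && c ≤ 'z') || ('A' ≤ c && c ≤ 'Z') || ('0' ≤ c && c ≤ '9') then [c]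
          else (replEsc c).toList)) := by
  induction l with
  | nil => rfl
  | cons c t ih =>
    have h1 : ∀ (x : String) (xs : List String),
        PySem.Str.join "" (x :: xs) = String.ofList (x.toList ++ (PySem.Str.join "" xs).toList) := by
      intro x xs
      cases xs <;> simp [PySem.Str.join, PySem.Chars.join, List.intercalate]
    rw [List.map_cons, h1, ih, List.flatMap_cons]
    congr 1
    simp only [String.toList_ofList]
    congr 1
    by_cases h : (('a' ≤ c && c ≤ 'z') || ('A' ≤ c && c ≤ 'Z') || ('0' ≤ c && c ≤ '9')) = true
    · simp [escChar, h]
    · simp only [Bool.not_eq_true] at h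
      simp [escChar, h]

-- ===== VERDICT (by name: the statement is the Claim_ definition above) =====
theorem escape_spec : Claim_equal_escape := by
  intro pattern _
  unfold Spec_escape escape
  have h := loop_eq pattern.toList []
  simp only [List.nil_append, List.length_nil, Nat.cast_zero] at h
  rw [h, join_map_escChar]
  rfl
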